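-- pv_equiv track=rewrite | github.com/ojh6404/imitator | imitator/models/obs_nets.py | calculate_conv_output_size
-- ===== SOURCE A (Python) =====
-- from typing import (
--     List,
--     Dict,
--     Tuple,
--     Union,
--     Optional,
--     Any,
--     Callable,
--     Iterable,
--     Type,
--     Sequence,
-- )
--
-- def calculate_conv_output_size(
--     input_size: List[int],
--     kernel_sizes: List[int],
--     strides: List[int],
--     paddings: List[int],
-- ) -> List[int]:
--     assert len(kernel_sizes) == len(strides) == len(paddings)
--     output_size = list(input_size)
--     for i in range(len(kernel_sizes)):
--         output_size[0] = (
--             output_size[0] + 2 * paddings[i] - kernel_sizes[i]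
--         ) // strides[i] + 1
--         output_size[1] = (
--             output_size[1] + 2 * paddings[i] - kernel_sizes[i]
--         ) // strides[i] + 1
--     return output_size
-- ===== SOURCE B (Python) =====
-- def calculate_conv_output_size(
--     input_size,
--     kernel_sizes,
--     strides,
--     paddings,
-- ):
--     assert len(kernel_sizes) == len(strides) == len(paddings)
--
--     def compose(layers):
--         # Compose a run of layers into one floor-affine map d -> (d + C) // S:
--         # a single layer sends d to (d + 2p - k)//s + 1 == (d + (2p - k + s))//s,
--         # and for positive strides two such maps compose by
--         # (C1, S1) then (C2, S2)  ==  (C1 + C2*S1, S1*S2).  Divide and conquer.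
--         if not layers:
--             return (0, 1)
--         if len(layers) == 1:
--             k, s, p = layers[0]
--             return (2 * p - k + s, s)
--         m = len(layers) // 2
--         C1, S1 = compose(layers[:m])
--         C2, S2 = compose(layers[m:])
--         return (C1 + C2 * S1, S1 * S2)
--
--     C, S = compose(list(zip(kernel_sizes, strides, paddings)))
--     return [(input_size[0] + C) // S, (input_size[1] + C) // S] + list(input_size[2:])
-- ===== Notes on version B (the rewrite author's own statement) =====
-- stated objective: alternative
-- what changed: Instead of iterating the per-layer recurrence on each dimension, B composes the whole layer stack into a single floor-affine map d -> (d + C) // S by divide-and-conquer composition of the per-layer maps, then computes each spatial dimension with one floor division.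
-- outside the precondition, e.g. on calculate_conv_output_size([5], [], [], []): A returns [5], B raises IndexError; on calculate_conv_output_size([11, 20], [4, 2], [-3, -1], [0, 0]): A returns [5, 8], B returns [4, 7]
import Mathlib
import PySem

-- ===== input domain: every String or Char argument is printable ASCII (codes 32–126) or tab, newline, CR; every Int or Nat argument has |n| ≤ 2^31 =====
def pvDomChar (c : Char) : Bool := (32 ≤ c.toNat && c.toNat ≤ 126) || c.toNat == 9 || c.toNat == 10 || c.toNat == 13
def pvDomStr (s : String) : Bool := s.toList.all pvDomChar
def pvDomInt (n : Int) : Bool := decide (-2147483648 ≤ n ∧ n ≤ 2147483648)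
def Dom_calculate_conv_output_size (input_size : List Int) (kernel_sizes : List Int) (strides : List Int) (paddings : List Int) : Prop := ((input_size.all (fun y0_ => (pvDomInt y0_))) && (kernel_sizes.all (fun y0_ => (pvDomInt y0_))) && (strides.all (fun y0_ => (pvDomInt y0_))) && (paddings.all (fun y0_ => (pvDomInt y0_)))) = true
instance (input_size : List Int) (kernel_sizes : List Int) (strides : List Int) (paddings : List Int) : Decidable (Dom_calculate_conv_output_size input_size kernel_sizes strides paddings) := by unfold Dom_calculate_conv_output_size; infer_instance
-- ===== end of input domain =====

-- B composes the whole layer stack into one floor-affine map (C, S) and does a single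
-- floor division per spatial dimension, instead of A's per-layer loop; objective: alternative.

-- ===== PORT A =====
-- Literal port of A: copy input_size, then for each layer i update slots 0 and 1 in place.
def calculate_conv_output_size (input_size : List Int) (kernel_sizes : List Int) (strides : List Int) (paddings : List Int) : List Int :=
  (List.range kernel_sizes.length).foldl (fun output_size i =>
    let output_size := output_size.set 0
      (PySem.Int.floordiv (output_size.getD 0 0 + 2 * paddings.getD i 0 - kernel_sizes.getD i 0) (strides.getD i 0) + 1)
    output_size.set 1
      (PySem.Int.floordiv (output_size.getD 1 0 + 2 * paddings.getD i 0 - kernel_sizes.getD i 0) (strides.getD i 0) + 1))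
    input_size

-- ===== PORT B =====
-- Literal port of B: divide-and-conquer composition of the layers into one map (C, S),
-- then one floordiv per dimension.
def composeLayers : List (Int × Int × Int) → Int × Int
  | [] => (0, 1)
  | [l] => (2 * l.2.2 - l.1 + l.2.1, l.2.1)
  | l₁ :: l₂ :: rest =>
    let ls := l₁ :: l₂ :: rest
    let m := ls.length / 2
    let L := composeLayers (ls.take m)
    let R := composeLayers (ls.drop m)
    (L.1 + R.1 * L.2, L.2 * R.2)
  termination_by ls => ls.length
  decreasing_by
  · simp only [List.length_take, List.length_cons]; omega
  · simp only [List.length_drop, List.length_cons]; omega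

def calculate_conv_output_size_alt (input_size : List Int) (kernel_sizes : List Int) (strides : List Int) (paddings : List Int) : List Int :=
  let cs := composeLayers (kernel_sizes.zip (strides.zip paddings))
  [PySem.Int.floordiv (input_size.getD 0 0 + cs.1) cs.2,
   PySem.Int.floordiv (input_size.getD 1 0 + cs.1) cs.2] ++ input_size.drop 2

-- ===== PRECONDITION & SPEC =====
-- Pre_ excludes: unequal layer-list lengths (A's assert raises AssertionError); input_size with
-- fewer than 2 elements (IndexError in both when a layer exists; with zero layers A returns the
-- copy while B's natural input_size[0]/input_size[1] accesses raise IndexError); and non-positive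
-- strides — stride 0 raises ZeroDivisionError in A, and negative strides are meaningless for
-- convolution layers and break B's stride-product composition of the floor divisions.
def Pre_calculate_conv_output_size (input_size : List Int) (kernel_sizes : List Int) (strides : List Int) (paddings : List Int) : Prop :=
  kernel_sizes.length = strides.length ∧ strides.length = paddings.length ∧
  2 ≤ input_size.length ∧ ∀ s ∈ strides, 1 ≤ s
instance (input_size : List Int) (kernel_sizes : List Int) (strides : List Int) (paddings : List Int) : Decidable (Pre_calculate_conv_output_size input_size kernel_sizes strides paddings) := by unfold Pre_calculate_conv_output_size; infer_instance
def pvWitness_calculate_conv_output_size : List Int × List Int × List Int × List Int := ([32, 32, 3], [3, 3], [2, 1], [1, 0])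

def Spec_calculate_conv_output_size (input_size : List Int) (kernel_sizes : List Int) (strides : List Int) (paddings : List Int) (out : List Int) : Prop := out = calculate_conv_output_size_alt input_size kernel_sizes strides paddings
instance (input_size : List Int) (kernel_sizes : List Int) (strides : List Int) (paddings : List Int) (out : List Int) : Decidable (Spec_calculate_conv_output_size input_size kernel_sizes strides paddings out) := by unfold Spec_calculate_conv_output_size; infer_instance

-- ===== CLAIM (what is proved, stated in full; the proofs are below) =====
def Claim_equal_calculate_conv_output_size : Prop := ∀ (input_size : List Int) (kernel_sizes : List Int) (strides : List Int) (paddings : List Int), Dom_calculate_conv_output_size input_size kernel_sizes strides paddings → Pre_calculate_conv_output_size input_size kernel_sizes strides paddings → Spec_calculate_conv_output_size input_size kernel_sizes strides paddings (calculate_conv_output_size input_size kernel_sizes strides paddings)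

-- ===== LEMMAS AND PROOFS =====

-- Proof-only helper: apply A's per-layer recurrence to one dimension.
def fDim (layers : List (Int × Int × Int)) (d : Int) : Int :=
  layers.foldl (fun d l => PySem.Int.floordiv (d + 2 * l.2.2 - l.1) l.2.1 + 1) d

-- Proof-only helper: B's (C, S) accumulation step.
def accStep (CS : Int × Int) (l : Int × Int × Int) : Int × Int :=
  (CS.1 + (2 * l.2.2 - l.1 + l.2.1) * CS.2, CS.2 * l.2.1)

-- Composition of floor divisions by positive divisors.
theorem floordiv_comp (a c m n : Int) (hm : 0 < m) (hn : 0 < n) :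
    PySem.Int.floordiv (PySem.Int.floordiv a m + c) n = PySem.Int.floordiv (a + c * m) (m * n) := by
  rw [PySem.Int.floordiv_eq_ediv_of_pos hm, PySem.Int.floordiv_eq_ediv_of_pos hn,
    PySem.Int.floordiv_eq_ediv_of_pos (by positivity)]
  rw [show a / m + c = (a + c * m) / m from (Int.add_mul_ediv_right a c (by omega)).symm]
  exact Int.ediv_ediv_of_nonneg (by omega)

-- B's foldl from an arbitrary accumulator, in terms of the fold from (0, 1).
theorem acc_from (t : List (Int × Int × Int)) : ∀ (init : Int × Int),
    t.foldl accStep init = (init.1 + (t.foldl accStep (0, 1)).1 * init.2, init.2 * (t.foldl accStep (0, 1)).2) := by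
  induction t with
  | nil => intro init; simp
  | cons l t ih =>
    intro init
    simp only [List.foldl_cons]
    rw [ih, ih (accStep (0, 1) l)]
    simp only [accStep, Prod.mk.injEq]
    exact ⟨by ring, by ring⟩

theorem acc_S_pos (t : List (Int × Int × Int)) (h : ∀ l ∈ t, 1 ≤ l.2.1) :
    0 < (t.foldl accStep (0, 1)).2 := by
  induction t with
  | nil => simp
  | cons l t ih =>
    simp only [List.foldl_cons]
    rw [acc_from]
    have h1 : 1 ≤ l.2.1 := h l (by simp)
    have h2 := ih (fun x hx => h x (by simp [hx]))
    simp only [accStep]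
    nlinarith

-- The per-dimension layer fold equals B's single floor division, for positive strides.
theorem fDim_eq_acc (t : List (Int × Int × Int)) : ∀ (d : Int), (∀ l ∈ t, 1 ≤ l.2.1) →
    fDim t d = PySem.Int.floordiv (d + (t.foldl accStep (0, 1)).1) (t.foldl accStep (0, 1)).2 := by
  induction t with
  | nil =>
    intro d _
    simp [fDim, PySem.Int.floordiv]
  | cons l t ih =>
    intro d h
    have hs : 1 ≤ l.2.1 := h l (by simp)
    have ht : ∀ x ∈ t, 1 ≤ x.2.1 := fun x hx => h x (by simp [hx])
    have hSt := acc_S_pos t ht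
    have hcons : (l :: t).foldl accStep (0, 1)
        = (2 * l.2.2 - l.1 + l.2.1 + (t.foldl accStep (0, 1)).1 * l.2.1,
           l.2.1 * (t.foldl accStep (0, 1)).2) := by
      simp only [List.foldl_cons, accStep]
      rw [acc_from t]
      simp only [Prod.mk.injEq]
      exact ⟨by ring, by ring⟩
    rw [hcons]
    rw [show fDim (l :: t) d = fDim t (PySem.Int.floordiv (d + 2 * l.2.2 - l.1) l.2.1 + 1) from rfl]
    rw [ih _ ht]
    rw [show PySem.Int.floordiv (d + 2 * l.2.2 - l.1) l.2.1 + 1 + (t.foldl accStep (0, 1)).1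
        = PySem.Int.floordiv (d + 2 * l.2.2 - l.1) l.2.1 + (1 + (t.foldl accStep (0, 1)).1) by ring]
    rw [floordiv_comp _ _ _ _ (by omega) hSt]
    congr 1
    ring

-- A's loop, started on a list with at least two elements, updates exactly the first two
-- dimensions by the per-dimension fold and leaves the tail untouched.
theorem loopA_eq (ks : List Int) : ∀ (ss ps : List Int), ks.length = ss.length → ss.length = ps.length →
    ∀ (a b : Int) (rest : List Int),
    (List.range ks.length).foldl (fun output_size i =>
      let output_size := output_size.set 0
        (PySem.Int.floordiv (output_size.getD 0 0 + 2 * ps.getD i 0 - ks.getD i 0) (ss.getD i 0) + 1)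
      output_size.set 1
        (PySem.Int.floordiv (output_size.getD 1 0 + 2 * ps.getD i 0 - ks.getD i 0) (ss.getD i 0) + 1))
      (a :: b :: rest)
    = fDim (ks.zip (ss.zip ps)) a :: fDim (ks.zip (ss.zip ps)) b :: rest := by
  induction ks with
  | nil => intro ss ps h1 h2 a b rest; simp [fDim]
  | cons k ks ih =>
    intro ss ps h1 h2 a b rest
    cases ss with
    | nil => simp at h1
    | cons s ss =>
      cases ps with
      | nil => simp at h2
      | cons p ps =>
        simp only [List.length_cons, List.range_succ_eq_map, List.foldl_cons, List.foldl_map,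
          List.getD_cons_succ, List.getD_cons_zero, List.set_cons_zero, List.set_cons_succ]
        rw [ih ss ps (by simpa using h1) (by simpa using h2)]
        simp [fDim]

-- The divide-and-conquer composition agrees with the left fold of accStep.
theorem composeLayers_eq_foldl : ∀ (ls : List (Int × Int × Int)),
    composeLayers ls = ls.foldl accStep (0, 1) := by
  intro ls
  induction ls using composeLayers.induct with
  | case1 => simp [composeLayers]
  | case2 l =>
    simp only [composeLayers, List.foldl_cons, List.foldl_nil, accStep]
    simp only [Prod.mk.injEq]
    exact ⟨by ring, by ring⟩
  | case3 l₁ l₂ rest ls m ih1 ih2 =>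
    rw [composeLayers]
    rw [show List.take ((l₁ :: l₂ :: rest).length / 2) (l₁ :: l₂ :: rest) = List.take m ls from rfl,
        show List.drop ((l₁ :: l₂ :: rest).length / 2) (l₁ :: l₂ :: rest) = List.drop m ls from rfl,
        ih1, ih2,
        show (l₁ :: l₂ :: rest) = List.take m ls ++ List.drop m ls from (List.take_append_drop m ls).symm]
    rw [List.foldl_append]
    conv_rhs => rw [acc_from]

-- ===== VERDICT (by name: the statement is the Claim_ definition above) =====
theorem calculate_conv_output_size_spec : Claim_equal_calculate_conv_output_size := by
  intro input_size ks ss ps _ hpre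
  obtain ⟨h1, h2, hlen, hs⟩ := hpre
  unfold Spec_calculate_conv_output_size calculate_conv_output_size calculate_conv_output_size_alt
  match input_size, hlen with
  | a :: b :: rest, _ =>
    rw [loopA_eq ks ss ps h1 h2 a b rest]
    have hall : ∀ l ∈ ks.zip (ss.zip ps), 1 ≤ l.2.1 := by
      intro l hl
      exact hs l.2.1 (List.of_mem_zip ((List.of_mem_zip hl).2)).1
    rw [fDim_eq_acc _ a hall, fDim_eq_acc _ b hall, ← composeLayers_eq_foldl]
    rfl
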